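-- pv_equiv track=rewrite | github.com/dzivaljic/alg_bio_inf | 4I.py | spectralConvolution
-- ===== SOURCE A (Python) =====
-- def spectralConvolution(spectrum):
--     rez=[]
--     for x in spectrum:
--         for y in spectrum:
--             if int(x)>int(y):
--                 rez.append(int(x)-int(y))
--     res=[]
--     for i in range(0,len(rez)):
--         res.append(str(rez[i]))
--
--     return sorted(res)
-- ===== SOURCE B (Python) =====
-- def spectralConvolution(spectrum):
--     res = []
--     rest = spectrum
--     while rest:
--         x, rest = rest[0], rest[1:]
--         for y in rest:
--             if x != y:
--                 res.append(str(abs(x - y)))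
--     return sorted(res)
-- ===== Notes on version B (the rewrite author's own statement) =====
-- stated objective: alternative
-- what changed: A scans all n^2 ordered pairs keeping positive differences and then stringifies in a separate index loop; B walks each suffix against its head (the n(n-1)/2 unordered pairs), emitting str(abs(x-y)) once per unequal pair, before the same lexicographic sort.
import Mathlib
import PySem

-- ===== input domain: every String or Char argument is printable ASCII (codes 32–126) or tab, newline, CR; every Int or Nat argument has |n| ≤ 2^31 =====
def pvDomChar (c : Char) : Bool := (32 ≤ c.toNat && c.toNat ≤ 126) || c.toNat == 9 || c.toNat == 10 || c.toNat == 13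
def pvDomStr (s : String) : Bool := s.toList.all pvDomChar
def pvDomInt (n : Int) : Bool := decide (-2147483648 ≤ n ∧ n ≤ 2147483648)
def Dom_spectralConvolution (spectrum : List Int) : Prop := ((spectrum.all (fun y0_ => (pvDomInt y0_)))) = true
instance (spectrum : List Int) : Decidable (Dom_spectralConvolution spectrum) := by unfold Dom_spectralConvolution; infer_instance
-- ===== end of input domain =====

-- B replaces A's scan over all n² ordered pairs by a scan over the n(n-1)/2 unordered pairs
-- (each suffix against its head), emitting str(abs(x-y)) once per unequal pair — a different
-- traversal with the same sorted result (objective: alternative/simpler; no asymptotic change).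

-- ===== PORT A =====
def spectralConvolution (spectrum : List Int) : List String :=
  let rez : List Int :=
    spectrum.foldl (fun rez x =>
      spectrum.foldl (fun rez y => if x > y then rez ++ [x - y] else rez) rez) []
  let res : List String :=
    (PySem.List.pyRange 0 (PySem.List.len rez) 1).foldl
      (fun res i => res ++ [PySem.Int.toStr (PySem.List.pyGetD rez i 0)]) []
  PySem.List.sorted res (fun s => s) false

-- ===== PORT B =====
-- the 'while rest: x, rest = rest[0], rest[1:]' loop of Source B, with the inner 'for y in rest'
def altLoop (res : List String) : List Int → List String
  | [] => res
  | x :: rest =>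
      altLoop (rest.foldl (fun res y =>
        if x ≠ y then res ++ [PySem.Int.toStr |x - y|] else res) res) rest

def spectralConvolution_alt (spectrum : List Int) : List String :=
  PySem.List.sorted (altLoop [] spectrum) (fun s => s) false

-- ===== PRECONDITION & SPEC =====
def Spec_spectralConvolution (spectrum : List Int) (out : List String) : Prop := out = spectralConvolution_alt spectrum
instance (spectrum : List Int) (out : List String) : Decidable (Spec_spectralConvolution spectrum out) := by unfold Spec_spectralConvolution; infer_instance

-- ===== CLAIM (what is proved, stated in full; the proofs are below) =====
def Claim_equal_spectralConvolution : Prop := ∀ (spectrum : List Int), Dom_spectralConvolution spectrum → Spec_spectralConvolution spectrum (spectralConvolution spectrum)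

-- ===== LEMMAS AND PROOFS =====

-- loop shape shared by both inner loops: conditional append is a filterMap
lemma foldl_ite_filterMap {α β : Type} (p : α → Prop) [DecidablePred p] (f : α → β)
    (s : List α) (acc : List β) :
    s.foldl (fun r y => if p y then r ++ [f y] else r) acc
      = acc ++ s.filterMap (fun y => if p y then some (f y) else none) := by
  induction s generalizing acc with
  | nil => simp
  | cons a t ih => by_cases h : p a <;> simp [h, ih]

-- the Int-level multiset produced by A's double loop
def Aint (s : List Int) : List Int :=
  s.flatMap (fun x => s.filterMap (fun y => if x > y then some (x - y) else none))

-- the Int-level multiset produced by B's triangular loop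
def Bint : List Int → List Int
  | [] => []
  | x :: t => t.filterMap (fun y => if x = y then none else some |x - y|) ++ Bint t

lemma flatMap_append_perm {α β : Type} (f g : α → List β) (s : List α) :
    (s.flatMap (fun a => f a ++ g a)).Perm (s.flatMap f ++ s.flatMap g) := by
  induction s with
  | nil => simp
  | cons a t ih =>
    simp only [List.flatMap_cons, List.append_assoc]
    refine List.Perm.append_left (f a) ?_
    exact (ih.append_left (g a)).trans (List.perm_append_comm_assoc _ _ _)

lemma flatMap_ite_singleton {α β : Type} (p : α → Prop) [DecidablePred p] (f : α → β)
    (s : List α) :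
    s.flatMap (fun a => if p a then [f a] else [])
      = s.filterMap (fun a => if p a then some (f a) else none) := by
  induction s with
  | nil => rfl
  | cons a t ih => by_cases h : p a <;> simp [h, ih]

-- merging the two one-sided contributions of a fixed head x against the tail
lemma merge_perm (x : Int) (s : List Int) :
    ((s.filterMap (fun y => if x > y then some (x - y) else none))
      ++ (s.filterMap (fun a => if a > x then some (a - x) else none))).Perm
      (s.filterMap (fun y => if x = y then none else some |x - y|)) := by
  induction s with
  | nil => simp
  | cons a t ih =>
    rcases lt_trichotomy x a with h | h | h
    · have habs : |x - a| = a - x := by rw [abs_sub_comm]; exact abs_of_pos (by omega)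
      simp only [List.filterMap_cons, if_neg (by omega : ¬ x > a),
        if_pos (show a > x from h), if_neg h.ne, habs]
      exact List.perm_middle.trans (ih.cons _)
    · subst h
      simp only [List.filterMap_cons, if_neg (lt_irrefl x)]
      exact ih
    · have habs : |x - a| = x - a := abs_of_pos (by omega)
      simp only [List.filterMap_cons, if_pos (show x > a from h),
        if_neg (by omega : ¬ a > x), if_neg h.ne', habs]
      exact ih.cons _

lemma aint_perm_bint (s : List Int) : (Aint s).Perm (Bint s) := by
  induction s with
  | nil => simp [Aint, Bint]
  | cons x t ih =>
    have hx : (x :: t).filterMap (fun y => if x > y then some (x - y) else none)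
        = t.filterMap (fun y => if x > y then some (x - y) else none) := by
      simp
    have hinner : ∀ a ∈ t, (x :: t).filterMap (fun y => if a > y then some (a - y) else none)
        = (if a > x then [a - x] else []) ++ t.filterMap (fun y => if a > y then some (a - y) else none) := by
      intro a _; by_cases h : a > x <;> simp [h]
    have h1 : Aint (x :: t)
        = t.filterMap (fun y => if x > y then some (x - y) else none)
          ++ t.flatMap (fun a => (if a > x then [a - x] else [])
              ++ t.filterMap (fun y => if a > y then some (a - y) else none)) := by
      simp only [Aint, List.flatMap_cons, hx]
      congr 1
      exact List.flatMap_congr hinner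
    rw [h1, Bint]
    refine List.Perm.trans (List.Perm.append_left _
      ((flatMap_append_perm _ _ t).trans (by rw [flatMap_ite_singleton]))) ?_
    have h2 : (t.filterMap (fun y => if x > y then some (x - y) else none)
        ++ (t.filterMap (fun a => if a > x then some (a - x) else none) ++ Aint t)).Perm
        ((t.filterMap (fun y => if x > y then some (x - y) else none)
          ++ t.filterMap (fun a => if a > x then some (a - x) else none)) ++ Aint t) := by
      simp [List.append_assoc]
    exact h2.trans ((merge_perm x t).append ih)

lemma altLoop_eq (s : List Int) : ∀ res : List String,
    altLoop res s = res ++ (Bint s).map PySem.Int.toStr := by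
  induction s with
  | nil => intro res; simp [altLoop, Bint]
  | cons x t ih =>
    intro res
    rw [altLoop, foldl_ite_filterMap (fun y => x ≠ y) (fun y => PySem.Int.toStr |x - y|), ih]
    simp only [Bint, List.map_append, List.map_filterMap, List.append_assoc]
    congr 2
    refine List.filterMap_congr ?_
    intro y _; by_cases h : x = y <;> simp [h]

lemma a_rez_eq (spectrum : List Int) :
    spectrum.foldl (fun rez x =>
      spectrum.foldl (fun rez y => if x > y then rez ++ [x - y] else rez) rez) []
      = Aint spectrum := by
  rw [show (fun (rez : List Int) (x : Int) =>
        spectrum.foldl (fun rez y => if x > y then rez ++ [x - y] else rez) rez)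
      = (fun rez x => rez ++ spectrum.filterMap (fun y => if x > y then some (x - y) else none))
    from funext fun rez => funext fun x =>
      foldl_ite_filterMap (fun y => x > y) (fun y => x - y) spectrum rez]
  rw [PySem.List.foldl_append_eq_flatMap]
  rfl

lemma a_res_eq (spectrum : List Int) :
    ((PySem.List.pyRange 0 (PySem.List.len (Aint spectrum)) 1).foldl
      (fun (res : List String) i => res ++ [PySem.Int.toStr (PySem.List.pyGetD (Aint spectrum) i 0)]) [])
      = (Aint spectrum).map PySem.Int.toStr := by
  rw [PySem.List.foldl_pyRange_zero_pyGetD (Aint spectrum) 0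
    (fun (acc : List String) (v : Int) => acc ++ [PySem.Int.toStr v]) []]
  rw [PySem.List.foldl_append_singleton_eq_map]
  simp

-- ===== VERDICT (by name: the statement is the Claim_ definition above) =====
theorem spectralConvolution_spec : Claim_equal_spectralConvolution := by
  intro spectrum _
  unfold Spec_spectralConvolution spectralConvolution spectralConvolution_alt
  simp only [a_rez_eq, a_res_eq, altLoop_eq, List.nil_append]
  exact (PySem.List.sorted_id_eq_sorted_id_iff_perm _ _).mpr
    ((aint_perm_bint spectrum).map PySem.Int.toStr)
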